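-- pv_equiv track=rewrite | github.com/jpan301/TRACE | benchmark/safe_real/safe_096.py | transform_orderby_for_error_upsampling
-- ===== SOURCE A (Python) =====
-- def transform_orderby_for_error_upsampling(orderby: list[str]) -> list[str]:
--     """
--     Transform orderby fields to use upsampled aggregation functions instead of raw ones
--     for error upsampling.
--
--     Args:
--         orderby: List of orderby strings like ["-count", "eps"]
--
--     Returns:
--         List of transformed orderby strings like ["-upsampled_count", "upsampled_eps"]
--     """
--     orderby_conversions = {
--         "count": "upsampled_count",
--         "eps": "upsampled_eps",
--         "epm": "upsampled_epm",
--         "sample_count": "count",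
--         "sample_eps": "eps",
--         "sample_epm": "epm",
--     }
--
--     transformed_orderby = []
--     for order_field in orderby:
--         if order_field.startswith("-"):
--             direction = "-"
--             field = order_field[1:]
--         else:
--             direction = ""
--             field = order_field
--
--         # Apply transformation if field needs it
--         if field in orderby_conversions:
--             field = orderby_conversions[field]
--
--         transformed_orderby.append(f"{direction}{field}")
--
--     return transformed_orderby
-- ===== SOURCE B (Python) =====
-- def transform_orderby_for_error_upsampling(orderby: list[str]) -> list[str]:
--     # The fixed mapping is a shift along the chain  sample_X -> X -> upsampled_X
--     # for X in {count, eps, epm}; no lookup table is needed: each field is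
--     # rewritten by prefix surgery (strip "sample_" / prepend "upsampled_").
--     METRICS = ("count", "eps", "epm")
--
--     def shift(field: str) -> str:
--         sign = "-" if field.startswith("-") else ""
--         core = field[len(sign):]
--         if core.startswith("sample_") and core[7:] in METRICS:
--             return sign + core[7:]
--         if core in METRICS:
--             return sign + "upsampled_" + core
--         return field
--
--     return [shift(f) for f in orderby]
-- ===== Notes on version B (the rewrite author's own statement) =====
-- stated objective: alternative
-- what changed: B drops the lookup table entirely: it exploits that the fixed mapping is a shift along the chain sample_X -> X -> upsampled_X for X in {count,eps,epm}, rewriting each field by prefix surgery (strip 'sample_' or prepend 'upsampled_'), and processes the list by structural recursion instead of an accumulator loop.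
import Mathlib
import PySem

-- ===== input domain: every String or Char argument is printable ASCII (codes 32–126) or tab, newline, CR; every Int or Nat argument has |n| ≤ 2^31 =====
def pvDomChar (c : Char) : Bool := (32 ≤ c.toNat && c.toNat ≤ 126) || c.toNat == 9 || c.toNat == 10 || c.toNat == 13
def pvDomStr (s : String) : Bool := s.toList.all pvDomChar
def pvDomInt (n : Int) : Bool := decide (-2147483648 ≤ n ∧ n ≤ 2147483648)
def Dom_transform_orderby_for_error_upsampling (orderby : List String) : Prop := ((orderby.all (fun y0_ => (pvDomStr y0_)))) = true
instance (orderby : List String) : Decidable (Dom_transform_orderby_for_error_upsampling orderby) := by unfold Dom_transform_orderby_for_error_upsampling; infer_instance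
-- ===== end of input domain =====

-- B replaces A's lookup table by prefix surgery along the chain sample_X -> X -> upsampled_X
-- for X in {count,eps,epm}, so no conversion dict exists in B (objective: alternative).

-- ===== PORT A =====
def pvConvA : PySem.Dict String String :=
  PySem.Dict.ofList
    [("count", "upsampled_count"), ("eps", "upsampled_eps"), ("epm", "upsampled_epm"),
     ("sample_count", "count"), ("sample_eps", "eps"), ("sample_epm", "epm")]

-- loop body of A: strip an optional "-" direction, convert the bare field, re-attach
def pvStepA (order_field : String) : String :=
  let p : String × String :=
    if PySem.Str.startswith order_field "-" then
      ("-", PySem.Str.slice order_field (some 1) none)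
    else
      ("", order_field)
  let field := if pvConvA.contains p.2 then (pvConvA.get? p.2).getD p.2 else p.2
  p.1 ++ field

def transform_orderby_for_error_upsampling (orderby : List String) : List String :=
  orderby.foldl (fun transformed order_field => transformed ++ [pvStepA order_field]) []

-- ===== PORT B =====
def pvMetrics : List String := ["count", "eps", "epm"]

-- per-field rewrite of B: strip "sample_" / prepend "upsampled_" by prefix surgery
def pvShiftB (field : String) : String :=
  let sign : String := if PySem.Str.startswith field "-" then "-" else ""
  let core : String := PySem.Str.slice field (some (PySem.Str.len sign : Int)) none
  if PySem.Str.startswith core "sample_" && pvMetrics.contains (PySem.Str.slice core (some 7) none) then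
    sign ++ PySem.Str.slice core (some 7) none
  else if pvMetrics.contains core then
    sign ++ "upsampled_" ++ core
  else field

def transform_orderby_for_error_upsampling_alt (orderby : List String) : List String :=
  orderby.map pvShiftB

-- ===== PRECONDITION & SPEC =====
def Spec_transform_orderby_for_error_upsampling (orderby : List String) (out : List String) : Prop := out = transform_orderby_for_error_upsampling_alt orderby
instance (orderby : List String) (out : List String) : Decidable (Spec_transform_orderby_for_error_upsampling orderby out) := by unfold Spec_transform_orderby_for_error_upsampling; infer_instance

-- ===== CLAIM =====
def Claim_equal_transform_orderby_for_error_upsampling : Prop := ∀ (orderby : List String), Dom_transform_orderby_for_error_upsampling orderby → Spec_transform_orderby_for_error_upsampling orderby (transform_orderby_for_error_upsampling orderby)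

-- ===== LEMMAS AND PROOFS =====

-- a string starting with "sample_" is "sample_" ++ its tail from index 7
theorem pv_sample_split (c : String) (h : PySem.Str.startswith c "sample_" = true) :
    c = "sample_" ++ PySem.Str.slice c (some 7) none := by
  obtain ⟨u, hu⟩ : ∃ u, ("sample_").toList ++ u = c.toList :=
    (PySem.Chars.startswith_iff _ _).mp (by simpa using h)
  apply String.toList_inj.mp
  rw [String.toList_append, PySem.Str.toList_slice, PySem.Chars.slice_eq_listSlice]
  rw [show (7:Int) = ((7:Nat):Int) from rfl, PySem.List.slice_from_natCast, ← hu,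
    show (7:Nat) = ("sample_".toList).length from rfl, List.drop_left]

theorem pv_neg_split (s : String) (h : PySem.Str.startswith s "-" = true) :
    s = "-" ++ PySem.Str.slice s (some 1) none := by
  obtain ⟨u, hu⟩ : ∃ u, ("-").toList ++ u = s.toList :=
    (PySem.Chars.startswith_iff _ _).mp (by simpa using h)
  apply String.toList_inj.mp
  rw [String.toList_append, PySem.Str.toList_slice, PySem.Chars.slice_eq_listSlice,
    PySem.List.slice_from_one, ← hu]
  rfl

theorem pv_step_eq (s : String) : pvStepA s = pvShiftB s := by
  by_cases h1 : s = "count";          · subst h1; decide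
  by_cases h2 : s = "eps";            · subst h2; decide
  by_cases h3 : s = "epm";            · subst h3; decide
  by_cases h4 : s = "sample_count";   · subst h4; decide
  by_cases h5 : s = "sample_eps";     · subst h5; decide
  by_cases h6 : s = "sample_epm";     · subst h6; decide
  by_cases h7 : s = "-count";         · subst h7; decide
  by_cases h8 : s = "-eps";           · subst h8; decide
  by_cases h9 : s = "-epm";           · subst h9; decide
  by_cases h10 : s = "-sample_count"; · subst h10; decide
  by_cases h11 : s = "-sample_eps";   · subst h11; decide
  by_cases h12 : s = "-sample_epm";   · subst h12; decide
  -- s matches none of the 12 rewritable forms: both sides return s unchanged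
  have hA : pvConvA = PySem.Dict.mk
    [("count", "upsampled_count"), ("eps", "upsampled_eps"), ("epm", "upsampled_epm"),
     ("sample_count", "count"), ("sample_eps", "eps"), ("sample_epm", "epm")] := by decide
  by_cases hstart : PySem.Str.startswith s "-" = true
  · have hs : s = "-" ++ PySem.Str.slice s (some 1) none := pv_neg_split s hstart
    set core := PySem.Str.slice s (some 1) none with hcore
    have key : ∀ (k : String), s ≠ "-" ++ k → core ≠ k := by
      intro k hk he; exact hk (by rw [hs, he])
    -- A side: core not a key of the conversion table
    have hc : pvConvA.contains core = false := by
      rw [PySem.Dict.contains_eq_decide_mem_keys]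
      simp [hA, PySem.Dict.keys_mk,
        key "count" h7, key "eps" h8, key "epm" h9,
        key "sample_count" h10, key "sample_eps" h11, key "sample_epm" h12]
    -- B side: the sample branch cannot fire
    have hsample : (PySem.Str.startswith core "sample_" &&
        pvMetrics.contains (PySem.Str.slice core (some 7) none)) = false := by
      by_cases hsw : PySem.Str.startswith core "sample_" = true
      · have hsplit := pv_sample_split core hsw
        have : pvMetrics.contains (PySem.Str.slice core (some 7) none) = false := by
          simp only [pvMetrics, List.contains_cons, List.contains_nil, Bool.or_false]
          have n1 : PySem.Str.slice core (some 7) none ≠ "count" := by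
            intro he; exact key "sample_count" h10 (by rw [hsplit, he]; decide)
          have n2 : PySem.Str.slice core (some 7) none ≠ "eps" := by
            intro he; exact key "sample_eps" h11 (by rw [hsplit, he]; decide)
          have n3 : PySem.Str.slice core (some 7) none ≠ "epm" := by
            intro he; exact key "sample_epm" h12 (by rw [hsplit, he]; decide)
          simp [n1, n2, n3]
        rw [hsw, this]; rfl
      · rw [Bool.eq_false_iff.mpr hsw]; rfl
    have hmet : pvMetrics.contains core = false := by
      simp [pvMetrics, key "count" h7, key "eps" h8, key "epm" h9]
    simp only [pvStepA, pvShiftB, hstart, if_true, ← hcore, hc, Bool.false_eq_true, if_false]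
    have hlen : (PySem.Str.len ("-" : String) : Int) = 1 := by decide
    rw [hlen, ← hcore, hsample, hmet]
    simp only [Bool.false_eq_true, if_false]
    exact hs.symm
  · -- no direction prefix: core is s itself
    have hc : pvConvA.contains s = false := by
      rw [PySem.Dict.contains_eq_decide_mem_keys]
      simp [hA, PySem.Dict.keys_mk, h1, h2, h3, h4, h5, h6]
    have hcore0 : PySem.Str.slice s (some ((PySem.Str.len ("" : String)) : Int)) none = s := by
      apply String.toList_inj.mp
      rw [PySem.Str.toList_slice, PySem.Chars.slice_eq_listSlice]
      have : ((PySem.Str.len ("" : String)) : Int) = ((0 : Nat) : Int) := by decide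
      rw [this, PySem.List.slice_from_natCast]
      simp
    have hsample : (PySem.Str.startswith s "sample_" &&
        pvMetrics.contains (PySem.Str.slice s (some 7) none)) = false := by
      by_cases hsw : PySem.Str.startswith s "sample_" = true
      · have hsplit := pv_sample_split s hsw
        have : pvMetrics.contains (PySem.Str.slice s (some 7) none) = false := by
          have n1 : PySem.Str.slice s (some 7) none ≠ "count" := by
            intro he; exact h4 (by rw [hsplit, he]; decide)
          have n2 : PySem.Str.slice s (some 7) none ≠ "eps" := by
            intro he; exact h5 (by rw [hsplit, he]; decide)
          have n3 : PySem.Str.slice s (some 7) none ≠ "epm" := by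
            intro he; exact h6 (by rw [hsplit, he]; decide)
          simp [pvMetrics, n1, n2, n3]
        rw [hsw, this]; rfl
      · rw [Bool.eq_false_iff.mpr hsw]; rfl
    have hmet : pvMetrics.contains s = false := by simp [pvMetrics, h1, h2, h3]
    simp only [pvStepA, pvShiftB, hstart, Bool.false_eq_true, if_false, hc,
      hcore0, hsample, hmet]
    simp

-- ===== VERDICT =====
theorem transform_orderby_for_error_upsampling_spec : Claim_equal_transform_orderby_for_error_upsampling := by
  intro orderby _
  unfold Spec_transform_orderby_for_error_upsampling
  unfold transform_orderby_for_error_upsampling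
  rw [PySem.List.foldl_append_singleton_eq_map]
  simp [transform_orderby_for_error_upsampling_alt, funext fun s => pv_step_eq s]
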